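-- pv_equiv track=rewrite | github.com/tanghaibao/jcvi | jcvi/utils/range.py | range_merge
-- ===== SOURCE A (Python) =====
-- def range_merge(ranges, dist=0):
--     """
--     Returns merged range. Similar to range_union, except this returns
--     new ranges.
--
--     >>> ranges = [("1", 30, 45), ("1", 40, 50), ("1", 10, 50)]
--     >>> range_merge(ranges)
--     [('1', 10, 50)]
--     >>> ranges = [("1", 30, 40), ("1", 45, 50)]
--     >>> range_merge(ranges)
--     [('1', 30, 40), ('1', 45, 50)]
--     >>> ranges = [("1", 30, 40), ("1", 45, 50)]
--     >>> range_merge(ranges, dist=5)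
--     [('1', 30, 50)]
--     """
--     if not ranges:
--         return []
--
--     ranges.sort()
--
--     cur_range = list(ranges[0])
--     merged_ranges = []
--     for r in ranges[1:]:
--         # open new range if start > cur_end or seqid != cur_seqid
--         if r[1] - cur_range[2] > dist or r[0] != cur_range[0]:
--             merged_ranges.append(tuple(cur_range))
--             cur_range = list(r)
--         else:
--             cur_range[2] = max(cur_range[2], r[2])
--     merged_ranges.append(tuple(cur_range))
--
--     return merged_ranges
-- ===== SOURCE B (Python) =====
-- def range_merge(ranges, dist=0):
--     # Incremental insertion: no sort; keeps a sorted list of already-merged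
--     # blocks and splices each incoming range into it, absorbing neighbours.
--     # (Return-value equivalent to A; unlike A it does not sort `ranges` in place.)
--     merged = []
--     for x in ranges:
--         q, s, e = x
--         out = []
--         i = 0
--         # copy blocks that stay strictly before x and cannot merge with it
--         while i < len(merged) and merged[i] < (q, s, e) and not (
--             merged[i][0] == q and s - merged[i][2] <= dist
--         ):
--             out.append(merged[i])
--             i += 1
--         # a preceding block merges with x: keep its start
--         if i < len(merged) and merged[i] < (q, s, e):
--             s = merged[i][1]
--             e = max(e, merged[i][2])
--             i += 1
--         # absorb every following block within reach
--         while i < len(merged) and merged[i][0] == q and merged[i][1] - e <= dist: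
--             e = max(e, merged[i][2])
--             i += 1
--         merged = out + [(q, s, e)] + merged[i:]
--     return merged
-- ===== Notes on version B (the rewrite author's own statement) =====
-- stated objective: alternative
-- what changed: Replaces A's sort-then-single-scan (sort all ranges, then one linear pass with a running current range) by a sort-free incremental algorithm: each incoming range is spliced into a maintained sorted list of already-merged disjoint blocks, merging with a preceding block and absorbing following blocks as needed.
import Mathlib
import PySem

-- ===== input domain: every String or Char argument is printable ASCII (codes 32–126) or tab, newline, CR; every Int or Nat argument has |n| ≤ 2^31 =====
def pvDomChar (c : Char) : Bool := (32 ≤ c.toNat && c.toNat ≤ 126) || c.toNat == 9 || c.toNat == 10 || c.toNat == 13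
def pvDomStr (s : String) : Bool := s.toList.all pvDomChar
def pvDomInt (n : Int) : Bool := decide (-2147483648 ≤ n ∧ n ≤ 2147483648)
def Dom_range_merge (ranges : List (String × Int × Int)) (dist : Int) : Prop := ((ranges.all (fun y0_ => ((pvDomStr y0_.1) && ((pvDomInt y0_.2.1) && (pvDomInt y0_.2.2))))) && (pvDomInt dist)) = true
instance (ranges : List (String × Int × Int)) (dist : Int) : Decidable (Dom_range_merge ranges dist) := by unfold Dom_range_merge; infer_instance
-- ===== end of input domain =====

-- B replaces A's sort-then-scan (sort `ranges`, one pass with a running current range) by an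
-- incremental insertion algorithm: no sort at all; each range is spliced into a maintained sorted
-- list of already-merged blocks, absorbing mergeable neighbours. Return-value equivalence only:
-- A sorts `ranges` in place, B leaves the argument unmodified.

-- Python's tuple comparison on (str, int, int): lexicographic, strings by code points.
abbrev tripLT (a b : String × Int × Int) : Prop :=
  a.1 < b.1 ∨ (a.1 = b.1 ∧ (a.2.1 < b.2.1 ∨ (a.2.1 = b.2.1 ∧ a.2.2 < b.2.2)))

-- ranges.sort() in A: Python's stable sort under tuple order, as stable insertion sort
-- (the shape of PySem.List.sorted_eq_foldl_insertBy, with the triple's lexicographic order).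
def pySortTriples (xs : List (String × Int × Int)) : List (String × Int × Int) :=
  xs.foldl (fun acc x => PySem.List.insertBy (fun a b => decide (tripLT a b)) x acc) []

-- ===== PORT A =====
-- A's for-loop over ranges[1:] with state (cur_range, merged_ranges); merged_ranges is `acc`.
def rmLoopA (dist : Int) : (String × Int × Int) → List (String × Int × Int) →
    List (String × Int × Int) → List (String × Int × Int)
  | cur, acc, [] => acc ++ [cur]
  | cur, acc, r :: rest =>
    if r.2.1 - cur.2.2 > dist ∨ r.1 ≠ cur.1 then
      rmLoopA dist r (acc ++ [cur]) rest
    else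
      rmLoopA dist (cur.1, cur.2.1, max cur.2.2 r.2.2) acc rest

def range_merge (ranges : List (String × Int × Int)) (dist : Int) : List (String × Int × Int) :=
  if ranges = [] then []
  else
    match pySortTriples ranges with
    | [] => []   -- unreachable: sorting a nonempty list is nonempty
    | h :: t => rmLoopA dist h [] t

-- ===== PORT B =====
-- Source B's last while loop: absorb every following block within reach of the growing (q, s, e).
def pvAbsorb (dist : Int) (cur : String × Int × Int) :
    List (String × Int × Int) → List (String × Int × Int)
  | [] => [cur]
  | h :: t =>
    if h.1 = cur.1 ∧ h.2.1 - cur.2.2 ≤ dist then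
      pvAbsorb dist (cur.1, cur.2.1, max cur.2.2 h.2.2) t
    else cur :: h :: t

-- Source B's scan loop: copy blocks strictly before x that cannot merge with it; then either a
-- preceding block merges with x (keep its start) or x starts fresh; then absorb the rest.
def pvInsert (dist : Int) (x : String × Int × Int) :
    List (String × Int × Int) → List (String × Int × Int)
  | [] => [x]
  | h :: t =>
    if tripLT h x then
      if h.1 = x.1 ∧ x.2.1 - h.2.2 ≤ dist then
        pvAbsorb dist (x.1, h.2.1, max x.2.2 h.2.2) t
      else h :: pvInsert dist x t
    else pvAbsorb dist x (h :: t)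

def range_merge_alt (ranges : List (String × Int × Int)) (dist : Int) : List (String × Int × Int) :=
  ranges.foldl (fun m x => pvInsert dist x m) []

-- ===== PRECONDITION & SPEC =====
def Spec_range_merge (ranges : List (String × Int × Int)) (dist : Int) (out : List (String × Int × Int)) : Prop := out = range_merge_alt ranges dist
instance (ranges : List (String × Int × Int)) (dist : Int) (out : List (String × Int × Int)) : Decidable (Spec_range_merge ranges dist out) := by unfold Spec_range_merge; infer_instance

-- ===== CLAIM (what is proved, stated in full; the proofs are below) =====
def Claim_equal_range_merge : Prop := ∀ (ranges : List (String × Int × Int)) (dist : Int), Dom_range_merge ranges dist → Spec_range_merge ranges dist (range_merge ranges dist)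

-- ===== LEMMAS AND PROOFS =====

-- order facts for the triple order
theorem tripLT_trans {a b c : String × Int × Int} (h1 : tripLT a b) (h2 : tripLT b c) :
    tripLT a c := by
  obtain ⟨a1, a2, a3⟩ := a; obtain ⟨b1, b2, b3⟩ := b; obtain ⟨c1, c2, c3⟩ := c
  simp only [tripLT] at *
  rcases h1 with h1 | ⟨rfl, h1⟩ <;> rcases h2 with h2 | ⟨rfl, h2⟩
  · exact Or.inl (lt_trans h1 h2)
  · exact Or.inl h1
  · exact Or.inl h2
  · rcases h1 with h1 | ⟨rfl, h1⟩ <;> rcases h2 with h2 | ⟨rfl, h2⟩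
    · exact Or.inr ⟨rfl, Or.inl (lt_trans h1 h2)⟩
    · exact Or.inr ⟨rfl, Or.inl h1⟩
    · exact Or.inr ⟨rfl, Or.inl h2⟩
    · exact Or.inr ⟨rfl, Or.inr ⟨rfl, lt_trans h1 h2⟩⟩

theorem tripLT_asymm {a b : String × Int × Int} (h1 : tripLT a b) : ¬ tripLT b a := by
  obtain ⟨a1, a2, a3⟩ := a; obtain ⟨b1, b2, b3⟩ := b
  simp only [tripLT] at *
  rcases h1 with h1 | ⟨rfl, h1⟩
  · rintro (h2 | ⟨rfl, h2⟩)
    · exact absurd h1 (lt_asymm h2)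
    · exact absurd h1 (lt_irrefl _)
  · rintro (h2 | ⟨e2, h2⟩)
    · exact absurd h2 (lt_irrefl _)
    · rcases h1 with h1 | ⟨e1, h1⟩ <;> rcases h2 with h2 | ⟨e2', h2⟩ <;> omega

theorem trip_tri (a b : String × Int × Int) : tripLT a b ∨ a = b ∨ tripLT b a := by
  obtain ⟨a1, a2, a3⟩ := a; obtain ⟨b1, b2, b3⟩ := b
  simp only [tripLT, Prod.mk.injEq]
  rcases lt_trichotomy a1 b1 with h1 | rfl | h1
  · exact Or.inl (Or.inl h1)
  · rcases lt_trichotomy a2 b2 with h2 | rfl | h2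
    · exact Or.inl (Or.inr ⟨rfl, Or.inl h2⟩)
    · rcases lt_trichotomy a3 b3 with h3 | rfl | h3
      · exact Or.inl (Or.inr ⟨rfl, Or.inr ⟨rfl, h3⟩⟩)
      · exact Or.inr (Or.inl ⟨rfl, rfl, rfl⟩)
      · exact Or.inr (Or.inr (Or.inr ⟨rfl, Or.inr ⟨rfl, h3⟩⟩))
    · exact Or.inr (Or.inr (Or.inr ⟨rfl, Or.inl h2⟩))
  · exact Or.inr (Or.inr (Or.inl h1))

theorem trip_eq_of_not_lt {a b : String × Int × Int} (h1 : ¬ tripLT a b) (h2 : ¬ tripLT b a) :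
    a = b := by
  rcases trip_tri a b with h | h | h
  · exact absurd h h1
  · exact h
  · exact absurd h h2

-- the (seqid, start) part of the order, which is all the merge logic sees
abbrev pairLE (a b : String × Int × Int) : Prop :=
  a.1 < b.1 ∨ (a.1 = b.1 ∧ a.2.1 ≤ b.2.1)

theorem pairLE_of_not_tripLT {a b : String × Int × Int} (h : ¬ tripLT b a) : pairLE a b := by
  rcases trip_tri a b with hlt | heq | hgt
  · rcases hlt with h1 | ⟨e, h2⟩
    · exact Or.inl h1
    · exact Or.inr ⟨e, by rcases h2 with h2 | ⟨e2, _⟩ <;> omega⟩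
  · subst heq; exact Or.inr ⟨rfl, le_refl _⟩
  · exact absurd hgt h

-- A's flush condition and the block-merge operation
abbrev sep (dist : Int) (c r : String × Int × Int) : Prop := r.2.1 - c.2.2 > dist ∨ r.1 ≠ c.1

def mer (c r : String × Int × Int) : String × Int × Int := (c.1, c.2.1, max c.2.2 r.2.2)

theorem mer_fst (a b : String × Int × Int) : (mer a b).1 = a.1 := rfl
theorem mer_snd1 (a b : String × Int × Int) : (mer a b).2.1 = a.2.1 := rfl
theorem mer_snd2 (a b : String × Int × Int) : (mer a b).2.2 = max a.2.2 b.2.2 := rfl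

theorem not_sep_iff {dist : Int} {c r : String × Int × Int} :
    ¬ sep dist c r ↔ (r.2.1 - c.2.2 ≤ dist ∧ r.1 = c.1) := by
  simp only [sep, not_or, not_lt, ne_eq, not_not]

-- A's merge of a (sorted) list, written as plain recursion (the proof-side normal form)
def mrg (dist : Int) : List (String × Int × Int) → List (String × Int × Int)
  | [] => []
  | [a] => [a]
  | a :: b :: t => if sep dist a b then a :: mrg dist (b :: t) else mrg dist (mer a b :: t)
termination_by l => l.length
decreasing_by all_goals simp

abbrev Srt (s : List (String × Int × Int)) : Prop := s.Pairwise (fun a b => ¬ tripLT b a)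

-- ---------- bridge: port A computes mrg of the sorted list ----------
theorem rmLoopA_eq_mrg (dist : Int) (l : List (String × Int × Int)) :
    ∀ cur acc, rmLoopA dist cur acc l = acc ++ mrg dist (cur :: l) := by
  induction l with
  | nil => intro cur acc; simp [rmLoopA, mrg]
  | cons r rest ih =>
    intro cur acc
    by_cases h : sep dist cur r
    · rw [rmLoopA, if_pos h, ih, mrg, if_pos h]; simp
    · rw [rmLoopA, if_neg h, ih, mrg, if_neg h]; rfl

theorem range_merge_eq_mrg (ranges : List (String × Int × Int)) (dist : Int) :
    range_merge ranges dist = mrg dist (pySortTriples ranges) := by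
  unfold range_merge
  by_cases hr : ranges = []
  · simp [hr, pySortTriples, mrg]
  · rw [if_neg hr]
    cases hs : pySortTriples ranges with
    | nil => simp [mrg]
    | cons h t =>
      show rmLoopA dist h [] t = mrg dist (h :: t)
      rw [rmLoopA_eq_mrg]; rfl

-- ---------- basic facts about mrg ----------
theorem mrg_head (dist : Int) :
    ∀ (t : List (String × Int × Int)) (h : String × Int × Int),
    ∃ E r, mrg dist (h :: t) = (h.1, h.2.1, E) :: r ∧ h.2.2 ≤ E := by
  intro t
  induction t with
  | nil => intro h; exact ⟨h.2.2, [], by simp [mrg], le_refl _⟩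
  | cons h2 t2 ih =>
    intro h
    by_cases hsep : sep dist h h2
    · exact ⟨h.2.2, mrg dist (h2 :: t2), by rw [mrg, if_pos hsep], le_refl _⟩
    · obtain ⟨E, r, hEq, hle⟩ := ih (mer h h2)
      exact ⟨E, r, by rw [mrg, if_neg hsep]; exact hEq,
        le_trans (le_max_left _ _) hle⟩

-- collapsing a mergeable pair deeper in the list
theorem mrg_step (dist : Int) (h h2 : String × Int × Int) (hm : ¬ sep dist h h2) :
    ∀ (t : List (String × Int × Int)) (c : String × Int × Int),
    mrg dist (c :: h :: h2 :: t) = mrg dist (c :: mer h h2 :: t) := by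
  intro t c
  obtain ⟨hd, hq⟩ := not_sep_iff.mp hm
  have hmer : mer (mer c h) h2 = mer c (mer h h2) := by simp [mer, max_assoc]
  by_cases hc : sep dist c h
  · have e1 : mrg dist (c :: h :: h2 :: t) = c :: mrg dist (mer h h2 :: t) := by
      rw [mrg, if_pos hc, mrg, if_neg hm]
    have e2 : mrg dist (c :: mer h h2 :: t) = c :: mrg dist (mer h h2 :: t) := by
      rw [mrg, if_pos (show sep dist c (mer h h2) from hc)]
    rw [e1, e2]
  · obtain ⟨hd2, hq2⟩ := not_sep_iff.mp hc
    have h1 : ¬ sep dist (mer c h) h2 := by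
      apply not_sep_iff.mpr
      refine ⟨?_, show h2.1 = c.1 from hq.trans hq2⟩
      show h2.2.1 - max c.2.2 h.2.2 ≤ dist
      have := le_max_right c.2.2 h.2.2
      omega
    have e1 : mrg dist (c :: h :: h2 :: t) = mrg dist (mer (mer c h) h2 :: t) := by
      rw [mrg, if_neg hc, mrg, if_neg h1]
    have e2 : mrg dist (c :: mer h h2 :: t) = mrg dist (mer c (mer h h2) :: t) := by
      rw [mrg, if_neg (show ¬ sep dist c (mer h h2) from hc)]
    rw [e1, e2, hmer]

-- duplicated head collapses
theorem mrg_dup (dist : Int) (h : String × Int × Int) (l : List (String × Int × Int)) :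
    mrg dist (h :: h :: l) = if sep dist h h then h :: mrg dist (h :: l) else mrg dist (h :: l) := by
  by_cases hs : sep dist h h
  · rw [mrg, if_pos hs, if_pos hs]
  · rw [mrg, if_neg hs, if_neg hs]
    have : mer h h = h := by simp [mer]
    rw [this]

-- ---------- S: absorbing into the front of a merged list ----------
theorem pvAbsorb_mrg (dist : Int) :
    ∀ (n : Nat) (l : List (String × Int × Int)) (cur : String × Int × Int),
    l.length ≤ n → (cur :: l).Pairwise pairLE →
    pvAbsorb dist cur (mrg dist l) = mrg dist (cur :: l) := by
  intro n
  induction n with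
  | zero =>
    intro l cur hlen _
    have : l = [] := List.eq_nil_of_length_eq_zero (Nat.le_zero.mp hlen)
    subst this; simp [mrg, pvAbsorb]
  | succ n ih =>
    intro l cur hlen hp
    match l with
    | [] => simp [mrg, pvAbsorb]
    | [h] =>
      rw [mrg]
      by_cases hm : h.1 = cur.1 ∧ h.2.1 - cur.2.2 ≤ dist
      · rw [pvAbsorb, if_pos hm]
        have hsep : ¬ sep dist cur h := not_sep_iff.mpr ⟨hm.2, hm.1⟩
        rw [mrg, if_neg hsep]
        simp [pvAbsorb, mrg, mer]
      · rw [pvAbsorb, if_neg hm]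
        have hsep : sep dist cur h := by
          by_contra hc
          obtain ⟨h1, h2⟩ := not_sep_iff.mp hc
          exact hm ⟨h2, h1⟩
        rw [mrg, if_pos hsep, mrg]
    | h :: h2 :: t =>
      by_cases hsep : sep dist h h2
      · rw [mrg, if_pos hsep]
        by_cases hm : h.1 = cur.1 ∧ h.2.1 - cur.2.2 ≤ dist
        · rw [pvAbsorb, if_pos hm]
          have hpm : ((cur.1, cur.2.1, max cur.2.2 h.2.2) :: h2 :: t).Pairwise pairLE := by
            have h1 := (List.pairwise_cons.mp hp).1
            have h2p := (List.pairwise_cons.mp hp).2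
            have h3 := (List.pairwise_cons.mp h2p).2
            refine List.pairwise_cons.mpr ⟨?_, h3⟩
            intro y hy
            have : pairLE cur y := h1 y (List.mem_cons_of_mem _ hy)
            exact this
          have := ih (h2 :: t) (cur.1, cur.2.1, max cur.2.2 h.2.2)
            (by simpa using Nat.le_of_succ_le_succ hlen) hpm
          rw [this]
          have hsc : ¬ sep dist cur h := not_sep_iff.mpr ⟨hm.2, hm.1⟩
          have e : mrg dist (cur :: h :: h2 :: t) = mrg dist (mer cur h :: h2 :: t) := by
            rw [mrg, if_neg hsc]
          rw [e]
          rfl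
        · rw [pvAbsorb, if_neg hm]
          have hsc : sep dist cur h := by
            by_contra hc
            obtain ⟨ha, hb⟩ := not_sep_iff.mp hc
            exact hm ⟨hb, ha⟩
          rw [mrg, if_pos hsc, mrg, if_pos hsep]
      · rw [mrg, if_neg hsep]
        have hpm : (cur :: mer h h2 :: t).Pairwise pairLE := by
          have h1 := (List.pairwise_cons.mp hp).1
          have h2p := (List.pairwise_cons.mp hp).2
          have h1h := (List.pairwise_cons.mp h2p).1
          have h3 := (List.pairwise_cons.mp h2p).2
          have h3' := (List.pairwise_cons.mp h3).2
          refine List.pairwise_cons.mpr ⟨?_, List.pairwise_cons.mpr ⟨?_, h3'⟩⟩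
          · intro y hy
            rcases List.mem_cons.mp hy with rfl | hy
            · exact h1 h (List.mem_cons_self)
            · exact h1 y (List.mem_cons_of_mem _ (List.mem_cons_of_mem _ hy))
          · intro y hy
            exact h1h y (List.mem_cons_of_mem _ hy)
        have := ih (mer h h2 :: t) cur (by simpa using Nat.le_of_succ_le_succ hlen) hpm
        rw [this, mrg_step dist h h2 hsep]

-- Srt gives the pairLE shape that pvAbsorb_mrg wants
theorem pairwise_pairLE_of_srt {s : List (String × Int × Int)} (h : Srt s) :
    s.Pairwise pairLE := h.imp (fun hab => pairLE_of_not_tripLT hab)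

-- ---------- duplicates: inserting an element equal to the head ----------
theorem mrg_insert_dup (dist : Int) (h : String × Int × Int) :
    ∀ (t : List (String × Int × Int)), Srt (h :: t) →
    mrg dist (h :: PySem.List.insertBy (fun a b => decide (tripLT a b)) h t) =
      mrg dist (h :: h :: t) := by
  intro t
  induction t with
  | nil => intro _; rfl
  | cons h2 t2 ih =>
    intro hs
    rw [PySem.List.insertBy]
    by_cases hlt : tripLT h h2
    · simp [hlt]
    · simp only [decide_eq_true_eq, hlt, if_false]
      have hle : ¬ tripLT h2 h := (List.pairwise_cons.mp hs).1 h2 (List.mem_cons_self)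
      have : h2 = h := trip_eq_of_not_lt (fun hc => hlt (by exact hc) ) hle |>.symm
      subst this
      have hs2 : Srt (h2 :: t2) := by
        have h1 := (List.pairwise_cons.mp hs).1
        have h2p := (List.pairwise_cons.mp hs).2
        have h3 := (List.pairwise_cons.mp h2p).2
        exact List.pairwise_cons.mpr ⟨fun y hy => h1 y (List.mem_cons_of_mem _ hy), h3⟩
      have ihh := ih hs2
      rw [mrg_dup, mrg_dup]
      by_cases hsep : sep dist h2 h2
      · rw [if_pos hsep, if_pos hsep, mrg_dup, if_pos hsep, ihh, mrg_dup, if_pos hsep]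
      · rw [if_neg hsep, if_neg hsep, mrg_dup, if_neg hsep, ihh, mrg_dup, if_neg hsep]

-- ---------- small order helpers ----------
theorem tripLT_irrefl (a : String × Int × Int) : ¬ tripLT a a := fun k => tripLT_asymm k k

theorem pairLE_snd {a b : String × Int × Int} (h : pairLE a b) (e : a.1 = b.1) :
    a.2.1 ≤ b.2.1 := by
  rcases h with h | ⟨_, h⟩
  · exact absurd e (ne_of_lt h)
  · exact h

theorem third_ge {a b : String × Int × Int} (h : ¬ tripLT a b) (e1 : a.1 = b.1)
    (e2 : a.2.1 = b.2.1) : b.2.2 ≤ a.2.2 := by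
  by_contra hc
  exact h (Or.inr ⟨e1, Or.inr ⟨e2, by omega⟩⟩)

theorem fst_eq_of_between {a b c : String × Int × Int} (h1 : pairLE a b) (h2 : pairLE b c)
    (e : c.1 = a.1) : b.1 = a.1 := by
  rcases h1 with h1 | ⟨e1, _⟩ <;> rcases h2 with h2 | ⟨e2, _⟩
  · exact absurd (e ▸ lt_trans h1 h2) (lt_irrefl _)
  · exact absurd ((e2.trans e) ▸ h1) (lt_irrefl _)
  · exact absurd ((e1 ▸ h2 : a.1 < c.1)) (e ▸ lt_irrefl _)
  · exact e1.symm

-- Srt survives collapsing a non-separated leading pair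
theorem srt_mer {dist : Int} {h h2 : String × Int × Int} {t2 : List (String × Int × Int)}
    (hs : Srt (h :: h2 :: t2)) (hm : ¬ sep dist h h2) : Srt (mer h h2 :: t2) := by
  obtain ⟨hd, hq⟩ := not_sep_iff.mp hm
  have hhall := (List.pairwise_cons.mp hs).1
  have hs2 := (List.pairwise_cons.mp hs).2
  have hh2all := (List.pairwise_cons.mp hs2).1
  have ht2 := (List.pairwise_cons.mp hs2).2
  refine List.pairwise_cons.mpr ⟨?_, ht2⟩
  intro y hy
  have hyh : ¬ tripLT y h := hhall y (List.mem_cons_of_mem _ hy)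
  have hyh2 : ¬ tripLT y h2 := hh2all y hy
  intro k
  simp only [tripLT, mer_fst, mer_snd1, mer_snd2] at k
  rcases k with k | ⟨e1, k | ⟨e2, k3⟩⟩
  · exact hyh (Or.inl k)
  · exact hyh (Or.inr ⟨e1, Or.inl k⟩)
  · -- y.1 = h.1, y.2.1 = h.2.1, y.2.2 < max h.2.2 h2.2.2
    have hp1 : pairLE h h2 := pairLE_of_not_tripLT (hhall h2 (List.mem_cons_self))
    have hp2 : pairLE h2 y := pairLE_of_not_tripLT hyh2
    have hs1 : h.2.1 ≤ h2.2.1 := pairLE_snd hp1 hq.symm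
    have hs2' : h2.2.1 ≤ y.2.1 := pairLE_snd hp2 (hq.trans e1.symm)
    have he2 : h2.2.1 = y.2.1 := by omega
    rcases max_choice h.2.2 h2.2.2 with hmx | hmx <;> rw [hmx] at k3
    · exact hyh (Or.inr ⟨e1, Or.inr ⟨e2, k3⟩⟩)
    · exact hyh2 (Or.inr ⟨e1.trans hq.symm, Or.inr ⟨he2.symm, k3⟩⟩)

-- ---------- L: inserting one range commutes with merging ----------
theorem pvInsert_mrg (dist : Int) :
    ∀ (n : Nat) (s : List (String × Int × Int)) (x : String × Int × Int),
    s.length ≤ n → Srt s →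
    pvInsert dist x (mrg dist s) =
      mrg dist (PySem.List.insertBy (fun a b => decide (tripLT a b)) x s) := by
  intro n
  induction n with
  | zero =>
    intro s x hlen _
    have : s = [] := List.eq_nil_of_length_eq_zero (Nat.le_zero.mp hlen)
    subst this
    simp [mrg, pvInsert, PySem.List.insertBy]
  | succ n ih =>
    intro s x hlen hs
    match s with
    | [] => simp [mrg, pvInsert, PySem.List.insertBy]
    | h :: t =>
      have hhall := (List.pairwise_cons.mp hs).1
      have hst : Srt t := (List.pairwise_cons.mp hs).2
      rcases trip_tri x h with hxh | hxh | hxh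
      · -- x < h : x goes first, absorb into the whole merged list
        rw [PySem.List.insertBy]
        simp only [decide_eq_true_eq, hxh, if_true]
        obtain ⟨E, r, hE, hEle⟩ := mrg_head dist t h
        have hnot : ¬ tripLT (h.1, h.2.1, E) x := by
          intro hcon
          rcases eq_or_lt_of_le hEle with heq | hlt
          · exact tripLT_asymm hxh (by
              have : (h.1, h.2.1, E) = h := by
                obtain ⟨a1, a2, a3⟩ := h; simp at heq ⊢; omega
              rwa [this] at hcon)
          · exact tripLT_asymm hxh
              (tripLT_trans (show tripLT h (h.1, h.2.1, E) from
                Or.inr ⟨rfl, Or.inr ⟨rfl, hlt⟩⟩) hcon)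
        rw [hE, pvInsert, if_neg hnot, ← hE]
        apply pvAbsorb_mrg dist (h :: t).length (h :: t) x (le_refl _)
        refine List.pairwise_cons.mpr ⟨?_, pairwise_pairLE_of_srt hs⟩
        intro y hy
        apply pairLE_of_not_tripLT
        rcases List.mem_cons.mp hy with rfl | hy
        · exact tripLT_asymm hxh
        · intro hc
          exact hhall y hy (tripLT_trans hc hxh)
      · -- x = h : duplicate head
        subst hxh
        rw [PySem.List.insertBy]
        simp only [decide_eq_true_eq, tripLT_irrefl x, if_false]
        rw [mrg_insert_dup dist x t hs]
        obtain ⟨E, r, hE, hEle⟩ := mrg_head dist t x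
        have hnot : ¬ tripLT (x.1, x.2.1, E) x := by
          rintro (k | ⟨-, k | ⟨-, k⟩⟩)
          · exact absurd k (lt_irrefl _)
          · exact absurd k (lt_irrefl _)
          · simp only [] at k
            omega
        rw [hE, pvInsert, if_neg hnot, ← hE]
        apply pvAbsorb_mrg dist (x :: t).length (x :: t) x (le_refl _)
        refine List.pairwise_cons.mpr ⟨?_, pairwise_pairLE_of_srt hs⟩
        intro y hy
        apply pairLE_of_not_tripLT
        rcases List.mem_cons.mp hy with rfl | hy
        · exact tripLT_irrefl y
        · exact hhall y hy
      · -- h < x : x goes past h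
        rw [PySem.List.insertBy]
        simp only [decide_eq_true_eq, tripLT_asymm hxh, if_false]
        match t with
        | [] =>
          rw [show mrg dist [h] = [h] by rw [mrg], pvInsert]
          rw [if_pos hxh, PySem.List.insertBy]
          by_cases c1 : h.1 = x.1 ∧ x.2.1 - h.2.2 ≤ dist
          · rw [if_pos c1]
            have hns : ¬ sep dist h x := not_sep_iff.mpr ⟨c1.2, c1.1.symm⟩
            rw [mrg, if_neg hns, pvAbsorb]
            show _ = mrg dist [mer h x]
            rw [show mrg dist [mer h x] = [mer h x] by rw [mrg]]
            simp [mer, c1.1, max_comm]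
          · rw [if_neg c1]
            have hsx : sep dist h x := by
              by_contra hc
              obtain ⟨ha, hb⟩ := not_sep_iff.mp hc
              exact c1 ⟨hb.symm, ha⟩
            rw [mrg, if_pos hsx]
            simp [pvInsert, mrg]
        | h2 :: t2 =>
          have hlen' : (h2 :: t2).length ≤ n := by simpa using Nat.le_of_succ_le_succ hlen
          have hph : pairLE h h2 := pairLE_of_not_tripLT (hhall h2 (List.mem_cons_self))
          by_cases hsep : sep dist h h2
          · rw [mrg, if_pos hsep]
            obtain ⟨E2, r2, hE2, hE2le⟩ := mrg_head dist t2 h2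
            rw [pvInsert, if_pos hxh]
            by_cases c1 : h.1 = x.1 ∧ x.2.1 - h.2.2 ≤ dist
            · -- left merge with h
              rw [if_pos c1]
              have hns : ¬ sep dist h x := not_sep_iff.mpr ⟨c1.2, c1.1.symm⟩
              have hxh2 : tripLT x h2 := by
                rcases hph with hlt1 | ⟨heq1, hle1⟩
                · exact Or.inl (c1.1 ▸ hlt1)
                · rcases hsep with hd1 | hq1
                  · exact Or.inr ⟨c1.1.symm.trans heq1, Or.inl (by omega)⟩
                  · exact absurd heq1.symm hq1
              rw [PySem.List.insertBy]
              simp only [decide_eq_true_eq, hxh2, if_true]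
              have hgoalR : mrg dist (h :: x :: h2 :: t2) = mrg dist (mer h x :: h2 :: t2) := by
                rw [mrg, if_neg hns]
              rw [hgoalR]
              have habs := pvAbsorb_mrg dist (h2 :: t2).length (h2 :: t2) (mer h x) (le_refl _)
                (by
                  refine List.pairwise_cons.mpr ⟨?_, pairwise_pairLE_of_srt hst⟩
                  intro y hy
                  have : pairLE h y := pairLE_of_not_tripLT (hhall y hy)
                  exact this)
              rw [show (x.1, h.2.1, max x.2.2 h.2.2) = mer h x by
                simp [mer, c1.1, max_comm]]
              exact habs
            · -- no left merge: h stays, recurse on the tail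
              rw [if_neg c1]
              have hsx : sep dist h x := by
                by_contra hc
                obtain ⟨ha, hb⟩ := not_sep_iff.mp hc
                exact c1 ⟨hb.symm, ha⟩
              rw [ih (h2 :: t2) x hlen' hst]
              -- head of insertBy is x or h2; either way it separates from h
              rw [PySem.List.insertBy]
              by_cases hxlt : tripLT x h2
              · simp only [decide_eq_true_eq, hxlt, if_true]
                rw [show mrg dist (h :: x :: h2 :: t2) = h :: mrg dist (x :: h2 :: t2) by
                  rw [mrg, if_pos hsx]]
              · simp only [decide_eq_true_eq, hxlt, if_false]
                rw [show mrg dist (h :: h2 :: PySem.List.insertBy (fun a b => decide (tripLT a b)) x t2) =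
                    h :: mrg dist (h2 :: PySem.List.insertBy (fun a b => decide (tripLT a b)) x t2) by
                  rw [mrg, if_pos hsep]]
          · -- h and h2 merge: recurse on the collapsed list
            have hg : mrg dist (h :: h2 :: t2) = mrg dist (mer h h2 :: t2) := by
              rw [mrg, if_neg hsep]
            obtain ⟨hd12, hq12⟩ := not_sep_iff.mp hsep
            have hlenm : (mer h h2 :: t2).length ≤ n := by simpa using Nat.le_of_succ_le_succ hlen
            have hsm : Srt (mer h h2 :: t2) := srt_mer hs hsep
            rw [hg, ih (mer h h2 :: t2) x hlenm hsm]
            have hphx : pairLE h x := pairLE_of_not_tripLT (tripLT_asymm hxh)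
            by_cases hxlt : tripLT x h2
            · -- x lands between h and h2
              have hpxh2 : pairLE x h2 := pairLE_of_not_tripLT (tripLT_asymm hxlt)
              have hfx : x.1 = h.1 := fst_eq_of_between hphx hpxh2 hq12
              have hs1 : h.2.1 ≤ x.2.1 := pairLE_snd hphx hfx.symm
              have hs2 : x.2.1 ≤ h2.2.1 := pairLE_snd hpxh2 (hfx.trans hq12.symm)
              have hnsx : ¬ sep dist h x := not_sep_iff.mpr ⟨by omega, hfx⟩
              have hRHS : mrg dist (h :: x :: h2 :: t2) =
                  mrg dist (mer (mer h x) h2 :: t2) := by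
                rw [mrg, if_neg hnsx, mrg, if_neg (show ¬ sep dist (mer h x) h2 by
                  apply not_sep_iff.mpr
                  refine ⟨?_, hq12⟩
                  show h2.2.1 - max h.2.2 x.2.2 ≤ dist
                  have := le_max_left h.2.2 x.2.2
                  omega)]
              have hIns2 : PySem.List.insertBy (fun a b => decide (tripLT a b)) x (h2 :: t2) =
                  x :: h2 :: t2 := by
                rw [PySem.List.insertBy]
                simp only [decide_eq_true_eq, hxlt, if_true]
              rw [hIns2, hRHS]
              by_cases hxg : tripLT x (mer h h2)
              · rw [PySem.List.insertBy]
                simp only [decide_eq_true_eq, hxg, if_true]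
                -- x merges with the collapsed block from the left
                have hx2 : x.2.1 = h.2.1 := by
                  have hxg' := hxg
                  simp only [tripLT, mer_fst, mer_snd1, mer_snd2] at hxg'
                  rcases hxg' with k | ⟨e1, k | ⟨e2, k3⟩⟩
                  · exact absurd (hfx ▸ k) (lt_irrefl _)
                  · omega
                  · exact e2
                have hxe : h.2.2 ≤ x.2.2 := third_ge (tripLT_asymm hxh) hfx hx2
                have hnsxg : ¬ sep dist x (mer h h2) := by
                  apply not_sep_iff.mpr
                  exact ⟨show h.2.1 - x.2.2 ≤ dist by omega, hfx.symm⟩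
                have e : mrg dist (x :: mer h h2 :: t2) = mrg dist (mer x (mer h h2) :: t2) := by
                  rw [mrg, if_neg hnsxg]
                rw [e]
                congr 1
                obtain ⟨x1, x2, x3⟩ := x; obtain ⟨a1, a2, a3⟩ := h; obtain ⟨b1, b2, b3⟩ := h2
                simp [mer] at hfx hx2 ⊢
                refine ⟨hfx, hx2, by omega⟩
              · rw [PySem.List.insertBy]
                simp only [decide_eq_true_eq, hxg, if_false]
                -- x slots right after the collapsed block and merges into it from the right
                have hins : PySem.List.insertBy (fun a b => decide (tripLT a b)) x t2 = x :: t2 := by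
                  match t2 with
                  | [] => rfl
                  | h3 :: t3 =>
                    have hh2all := (List.pairwise_cons.mp hst).1
                    have hxh3 : tripLT x h3 := by
                      by_contra hc
                      rcases trip_tri x h3 with k | k | k
                      · exact hc k
                      · exact hh2all h3 (List.mem_cons_self) (k ▸ hxlt)
                      · exact hh2all h3 (List.mem_cons_self) (tripLT_trans k hxlt)
                    rw [PySem.List.insertBy]
                    simp only [decide_eq_true_eq, hxh3, if_true]
                rw [hins]
                have hnsgx : ¬ sep dist (mer h h2) x := by
                  apply not_sep_iff.mpr
                  exact ⟨show x.2.1 - max h.2.2 h2.2.2 ≤ dist by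
                    have := le_max_left h.2.2 h2.2.2; omega, hfx⟩
                have e : mrg dist (mer h h2 :: x :: t2) = mrg dist (mer (mer h h2) x :: t2) := by
                  rw [mrg, if_neg hnsgx]
                rw [e]
                congr 1
                obtain ⟨x1, x2, x3⟩ := x; obtain ⟨a1, a2, a3⟩ := h; obtain ⟨b1, b2, b3⟩ := h2
                simp [mer]
                omega
            · -- x goes past h2 as well: both sides collapse the pair first
              have hRHS : PySem.List.insertBy (fun a b => decide (tripLT a b)) x (h2 :: t2) =
                  h2 :: PySem.List.insertBy (fun a b => decide (tripLT a b)) x t2 := by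
                rw [PySem.List.insertBy]
                simp only [decide_eq_true_eq, hxlt, if_false]
              rw [hRHS]
              have hph2x : pairLE h2 x := pairLE_of_not_tripLT hxlt
              have hxg : ¬ tripLT x (mer h h2) := by
                intro k0
                simp only [tripLT, mer_fst, mer_snd1, mer_snd2] at k0
                rcases k0 with k | ⟨e1, k | ⟨e2, k3⟩⟩
                · rcases hphx with k2 | ⟨e2', _⟩
                  · exact absurd (lt_trans k2 k) (lt_irrefl _)
                  · exact absurd (e2' ▸ k) (lt_irrefl _)
                · have : h.2.1 ≤ x.2.1 := pairLE_snd hphx e1.symm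
                  omega
                · -- pair x = pair h; compare third components
                  have hx1 : x.1 = h2.1 := e1.trans hq12.symm
                  have hs1 : h.2.1 ≤ h2.2.1 := pairLE_snd hph hq12.symm
                  have hs2 : h2.2.1 ≤ x.2.1 := pairLE_snd hph2x (hq12.trans e1.symm)
                  have he21 : x.2.1 = h2.2.1 := by omega
                  have hxe : h.2.2 ≤ x.2.2 := third_ge (tripLT_asymm hxh) e1 e2
                  have hxe2 : h2.2.2 ≤ x.2.2 := third_ge hxlt hx1 he21
                  rcases max_choice h.2.2 h2.2.2 with hmx | hmx <;> rw [hmx] at k3 <;> omega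
              rw [PySem.List.insertBy]
              simp only [decide_eq_true_eq, hxg, if_false]
              have e : mrg dist (h :: h2 :: PySem.List.insertBy (fun a b => decide (tripLT a b)) x t2) =
                  mrg dist (mer h h2 :: PySem.List.insertBy (fun a b => decide (tripLT a b)) x t2) := by
                rw [mrg, if_neg hsep]
              rw [e]

-- Srt is preserved by insertBy
theorem srt_insertBy {s : List (String × Int × Int)} (x : String × Int × Int) (h : Srt s) :
    Srt (PySem.List.insertBy (fun a b => decide (tripLT a b)) x s) := by
  induction s with
  | nil => simp [PySem.List.insertBy]
  | cons y l ih =>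
    rw [PySem.List.insertBy]
    have h1 := (List.pairwise_cons.mp h).1
    have h2 := (List.pairwise_cons.mp h).2
    by_cases hlt : tripLT x y
    · simp only [decide_eq_true_eq, hlt, if_true]
      refine List.pairwise_cons.mpr ⟨?_, h⟩
      intro z hz
      rcases List.mem_cons.mp hz with rfl | hz
      · exact tripLT_asymm hlt
      · intro hc
        exact (h1 z hz) (tripLT_trans hc hlt)
    · simp only [decide_eq_true_eq, hlt, if_false]
      refine List.pairwise_cons.mpr ⟨?_, ih h2⟩
      intro z hz
      rcases (PySem.List.mem_insertBy _ _ _ _).mp hz with rfl | hz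
      · exact hlt
      · exact h1 z hz

theorem foldl_insert_srt (dist : Int) (xs : List (String × Int × Int)) :
    ∀ s, Srt s →
    List.foldl (fun m x => pvInsert dist x m) (mrg dist s) xs =
      mrg dist (xs.foldl (fun acc x => PySem.List.insertBy (fun a b => decide (tripLT a b)) x acc) s) := by
  induction xs with
  | nil => intro s _; rfl
  | cons x xs ih =>
    intro s hs
    simp only [List.foldl_cons]
    rw [pvInsert_mrg dist s.length s x (le_refl _) hs]
    exact ih _ (srt_insertBy x hs)

-- ===== VERDICT (by name: the statement is the Claim_ definition above) =====
theorem range_merge_spec : Claim_equal_range_merge := by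
  intro ranges dist _
  unfold Spec_range_merge
  rw [range_merge_eq_mrg]
  unfold range_merge_alt pySortTriples
  have := foldl_insert_srt dist ranges [] (by simp)
  rw [mrg] at this
  exact this.symm
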